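-- pv_equiv track=rewrite | github.com/Aimarcapo/EntornoServidor | Zailtasun Erdikoak/4ariketa.py | positiboak_ordenatu
-- ===== SOURCE A (Python) =====
-- def positiboak_ordenatu(zerrenda):
--
--     if not zerrenda:
--         return []
--
--     positiboak = sorted([x for x in zerrenda if x > 0])
--
--     emaitza = []
--     index = 0
--
--     for zenbaki in zerrenda:
--         if zenbaki > 0:
--
--             emaitza.append(positiboak[index])
--             index += 1
--         else:
--
--             emaitza.append(zenbaki)
--
--     return emaitza
-- ===== SOURCE B (Python) =====
-- def positiboak_ordenatu(zerrenda):
--     rest = list(zerrenda)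
--     out = []
--     while rest:
--         x = rest.pop(0)
--         if x <= 0:
--             out.append(x)
--             continue
--         m = x
--         for y in rest:
--             if 0 < y < m:
--                 m = y
--         if m != x:
--             # swap: the minimum positive comes to this slot, x goes to m's slot
--             rest[rest.index(m)] = x
--             x = m
--         out.append(x)
--     return out
-- ===== Notes on version B (the rewrite author's own statement) =====
-- stated objective: alternative
-- what changed: Replaces A's 'sort the positives with sorted(), then re-thread them through the list' by an in-place selection sort restricted to positive slots: repeatedly take the front element, and if it is positive swap it with the minimum remaining positive found by a linear scan; no library sort and no separate sorted-positives list is ever built.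
import Mathlib
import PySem

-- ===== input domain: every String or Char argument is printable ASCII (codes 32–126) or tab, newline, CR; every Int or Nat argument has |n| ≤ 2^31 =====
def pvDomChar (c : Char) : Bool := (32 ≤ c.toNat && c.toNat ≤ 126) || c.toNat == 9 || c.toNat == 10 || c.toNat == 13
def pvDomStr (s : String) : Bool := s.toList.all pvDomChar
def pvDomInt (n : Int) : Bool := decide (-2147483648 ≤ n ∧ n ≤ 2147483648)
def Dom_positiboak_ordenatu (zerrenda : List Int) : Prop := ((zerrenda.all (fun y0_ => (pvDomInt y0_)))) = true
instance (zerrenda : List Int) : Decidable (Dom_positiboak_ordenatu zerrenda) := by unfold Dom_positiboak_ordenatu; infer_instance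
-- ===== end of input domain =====

-- B replaces A's library sort of the positives plus re-threading by an in-place selection sort
-- restricted to the positive slots (repeated minimum-scan and swap); alternative decomposition.

-- ===== PORT A =====
-- positiboak[index]: index always stays within range (one increment per positive), so getD's
-- default 0 is never consulted; A raises nowhere.
def positiboak_ordenatu (zerrenda : List Int) : List Int :=
  if zerrenda = [] then []
  else
    let positiboak := PySem.List.sorted (zerrenda.filter (fun x => decide (0 < x))) (fun x => x) false
    (zerrenda.foldl
      (fun (st : List Int × Nat) zenbaki =>
        if 0 < zenbaki then (st.1 ++ [positiboak.getD st.2 0], st.2 + 1)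
        else (st.1 ++ [zenbaki], st.2))
      ([], 0)).1

-- ===== PORT B =====
-- `rest[rest.index(m)] = x`: replace the FIRST occurrence of m by x (when called, m ≠ x came
-- from rest, so m is present and Python's .index cannot raise; pvRep is exact there)
def pvRep : List Int → Int → Int → List Int
  | [], _, _ => []
  | y :: ys, old, nw => if y = old then nw :: ys else y :: pvRep ys old nw

lemma pvRep_length (ys : List Int) (old nw : Int) : (pvRep ys old nw).length = ys.length := by
  induction ys with
  | nil => rfl
  | cons y ys ih => by_cases h : y = old <;> simp [pvRep, h, ih]

-- the while-loop: pop the front, select the minimum remaining positive, swap it in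
def selGo : List Int → List Int
  | [] => []
  | x :: rest =>
    if x ≤ 0 then x :: selGo rest
    else
      let m := rest.foldl (fun m y => if 0 < y ∧ y < m then y else m) x
      if m ≠ x then m :: selGo (pvRep rest m x)
      else x :: selGo rest
termination_by xs => xs.length
decreasing_by
  · simp
  · simp [pvRep_length]
  · simp

def positiboak_ordenatu_alt (zerrenda : List Int) : List Int := selGo zerrenda

-- ===== PRECONDITION & SPEC =====
def Spec_positiboak_ordenatu (zerrenda : List Int) (out : List Int) : Prop := out = positiboak_ordenatu_alt zerrenda
instance (zerrenda : List Int) (out : List Int) : Decidable (Spec_positiboak_ordenatu zerrenda out) := by unfold Spec_positiboak_ordenatu; infer_instance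

-- ===== CLAIM (what is proved, stated in full; the proofs are below) =====
def Claim_equal_positiboak_ordenatu : Prop := ∀ (zerrenda : List Int), Dom_positiboak_ordenatu zerrenda → Spec_positiboak_ordenatu zerrenda (positiboak_ordenatu zerrenda)

-- ===== LEMMAS AND PROOFS =====

-- both programs compute this recursive "thread the sorted positives back in" function
def mergeP : List Int → List Int → List Int
  | [], _ => []
  | x :: xs, ps => if 0 < x then ps.headD 0 :: mergeP xs ps.tail else x :: mergeP xs ps

def sortedP (l : List Int) : List Int := PySem.List.sorted l (fun x => x) false

lemma aloop_eq (pos : List Int) (z : List Int) : ∀ (acc : List Int) (n : Nat),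
    (z.foldl
      (fun (st : List Int × Nat) zenbaki =>
        if 0 < zenbaki then (st.1 ++ [pos.getD st.2 0], st.2 + 1)
        else (st.1 ++ [zenbaki], st.2))
      (acc, n)).1 = acc ++ mergeP z (pos.drop n) := by
  induction z with
  | nil => intro acc n; simp [mergeP]
  | cons x xs ih =>
    intro acc n
    by_cases hx : 0 < x
    · simp only [List.foldl_cons, if_pos hx]
      rw [ih]
      simp [mergeP, if_pos hx, List.tail_drop]
    · simp only [List.foldl_cons, if_neg hx]
      rw [ih]
      simp [mergeP, if_neg hx]

lemma a_eq_merge (z : List Int) :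
    positiboak_ordenatu z = mergeP z (sortedP (z.filter (fun x => decide (0 < x)))) := by
  unfold positiboak_ordenatu sortedP
  by_cases h : z = []
  · subst h; simp [mergeP]
  · rw [if_neg h]
    simpa using aloop_eq _ z [] 0

-- the min-fold of B's inner scan
def mFold (x : Int) (rest : List Int) : Int :=
  rest.foldl (fun m y => if 0 < y ∧ y < m then y else m) x

lemma minFold (rest : List Int) : ∀ x : Int,
    (mFold x rest = x ∨ mFold x rest ∈ rest) ∧ mFold x rest ≤ x ∧
    (∀ y ∈ rest, 0 < y → mFold x rest ≤ y) ∧ (0 < x → 0 < mFold x rest) := by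
  induction rest with
  | nil => intro x; exact ⟨Or.inl rfl, le_refl x, by simp, fun h => h⟩
  | cons y ys ih =>
    intro x
    by_cases h : 0 < y ∧ y < x
    · obtain ⟨h1, h2, h3, h4⟩ := ih y
      have hstep : mFold x (y :: ys) = mFold y ys := by simp [mFold, h]
      rw [hstep]
      refine ⟨?_, le_trans h2 (le_of_lt h.2), ?_, fun _ => h4 h.1⟩
      · rcases h1 with h1 | h1
        · exact Or.inr (by simp [h1])
        · exact Or.inr (by simp [h1])
      · intro z hz hzpos
        rcases List.mem_cons.mp hz with rfl | hz
        · exact h2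
        · exact h3 z hz hzpos
    · obtain ⟨h1, h2, h3, h4⟩ := ih x
      have hstep : mFold x (y :: ys) = mFold x ys := by simp [mFold, h]
      rw [hstep]
      refine ⟨?_, h2, ?_, h4⟩
      · rcases h1 with h1 | h1
        · exact Or.inl h1
        · exact Or.inr (by simp [h1])
      · intro z hz hzpos
        rcases List.mem_cons.mp hz with rfl | hz
        · have : ¬ z < x := fun hlt => h ⟨hzpos, hlt⟩
          exact le_trans h2 (not_lt.mp this)
        · exact h3 z hz hzpos

-- replacing one positive entry by another positive entry does not change mergeP
lemma mergeP_pvRep (rest : List Int) : ∀ (m x : Int) (ps : List Int), 0 < m → 0 < x →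
    mergeP (pvRep rest m x) ps = mergeP rest ps := by
  induction rest with
  | nil => intro m x ps _ _; rfl
  | cons y ys ih =>
    intro m x ps hm hx
    by_cases h : y = m
    · subst h
      simp [pvRep, mergeP, hm, hx]
    · by_cases hy : 0 < y <;> simp [pvRep, h, mergeP, hy, ih m x _ hm hx]

lemma filter_pvRep (rest : List Int) : ∀ (m x : Int), 0 < m → 0 < x →
    (pvRep rest m x).filter (fun v => decide (0 < v))
      = pvRep (rest.filter (fun v => decide (0 < v))) m x := by
  induction rest with
  | nil => intro m x _ _; rfl
  | cons y ys ih =>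
    intro m x hm hx
    by_cases h : y = m
    · subst h
      simp [pvRep, hm, hx]
    · by_cases hy : 0 < y <;> simp [pvRep, h, hy, ih m x hm hx]

lemma pvRep_perm (l : List Int) : ∀ (m x : Int), m ∈ l →
    (pvRep l m x).Perm (x :: l.erase m) := by
  induction l with
  | nil => intro m x h; simp at h
  | cons y ys ih =>
    intro m x hm
    by_cases h : y = m
    · subst h
      simp [pvRep, List.erase_cons_head]
    · have hm' : m ∈ ys := by
        rcases List.mem_cons.mp hm with h' | h'
        · exact absurd h'.symm h
        · exact h'
      have herase : (y :: ys).erase m = y :: ys.erase m :=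
        List.erase_cons_tail (by simpa using h)
      rw [herase]
      simp only [pvRep, if_neg h]
      exact ((ih m x hm').cons y).trans (List.Perm.swap x y _)

lemma sortedP_perm_congr {l l' : List Int} (h : l.Perm l') : sortedP l = sortedP l' :=
  PySem.List.sorted_eq_sorted_of_perm l l' (fun x => x) (fun _ _ h => h) h

lemma sortedP_cons_min (x : Int) (l : List Int) (h : ∀ y ∈ l, x ≤ y) :
    sortedP (x :: l) = x :: sortedP l := by
  apply PySem.List.sorted_id_eq_of_perm_of_pairwise
  · exact (PySem.List.sorted_perm l (fun x => x) false).cons x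
  · refine List.pairwise_cons.mpr ⟨?_, ?_⟩
    · intro y hy
      exact h y ((PySem.List.mem_sorted _ _ _ _).mp hy)
    · exact PySem.List.sorted_pairwise l (fun x => x)

lemma sortedP_min_erase (m : Int) (P : List Int) (hmem : m ∈ P) (hmin : ∀ y ∈ P, m ≤ y) :
    sortedP P = m :: sortedP (P.erase m) := by
  rw [sortedP_perm_congr (List.perm_cons_erase hmem)]
  exact sortedP_cons_min m _ (fun y hy => hmin y (List.mem_of_mem_erase hy))

lemma selGo_eq : ∀ (n : Nat) (z : List Int), z.length = n →
    selGo z = mergeP z (sortedP (z.filter (fun v => decide (0 < v)))) := by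
  intro n
  induction n using Nat.strong_induction_on with
  | _ n ih =>
    intro z hlen
    match z with
    | [] => simp [selGo, mergeP]
    | x :: rest =>
      have hn : rest.length + 1 = n := by simpa using hlen
      by_cases hx : x ≤ 0
      · have hx' : ¬ 0 < x := not_lt.mpr hx
        rw [selGo, if_pos hx]
        rw [ih rest.length (by omega) rest rfl]
        simp [hx', mergeP]
      · have hx' : 0 < x := by omega
        obtain ⟨hm1, hm2, hm3, hm4⟩ := minFold rest x
        have hmpos : 0 < mFold x rest := hm4 hx'
        rw [selGo, if_neg hx]
        show (if mFold x rest ≠ x then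
                mFold x rest :: selGo (pvRep rest (mFold x rest) x)
              else x :: selGo rest)
            = mergeP (x :: rest) (sortedP ((x :: rest).filter (fun v => decide (0 < v))))
        set m := mFold x rest with hmdef
        have hfc : (x :: rest).filter (fun v => decide (0 < v))
            = x :: rest.filter (fun v => decide (0 < v)) := by
          simp [hx']
        rw [hfc]
        by_cases hmx : m = x
        · rw [if_neg (by simpa using hmx)]
          rw [ih rest.length (by omega) rest rfl]
          have hmin : ∀ y ∈ rest.filter (fun v => decide (0 < v)), x ≤ y := by
            intro y hy
            have := List.of_mem_filter hy
            exact hmx ▸ hm3 y (List.mem_of_mem_filter hy) (by simpa using this)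
          rw [sortedP_cons_min x _ hmin]
          simp [mergeP, hx']
        · rw [if_pos (by simpa using hmx)]
          have hmrest : m ∈ rest := by
            rcases hm1 with h | h
            · exact absurd h hmx
            · exact h
          have hlen' : (pvRep rest m x).length < n := by
            rw [pvRep_length]; omega
          rw [ih _ hlen' (pvRep rest m x) rfl]
          rw [filter_pvRep rest m x hmpos hx']
          have hmF : m ∈ rest.filter (fun v => decide (0 < v)) :=
            List.mem_filter.mpr ⟨hmrest, by simpa using hmpos⟩
          rw [sortedP_perm_congr (pvRep_perm _ m x hmF)]
          rw [mergeP_pvRep rest m x _ hmpos hx']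
          have hmemP : m ∈ x :: rest.filter (fun v => decide (0 < v)) :=
            List.mem_cons_of_mem x hmF
          have hminP : ∀ y ∈ x :: rest.filter (fun v => decide (0 < v)), m ≤ y := by
            intro y hy
            rcases List.mem_cons.mp hy with rfl | hy
            · exact hm2
            · exact hm3 y (List.mem_of_mem_filter hy) (by simpa using List.of_mem_filter hy)
          rw [sortedP_min_erase m _ hmemP hminP]
          have hxm : x ≠ m := fun h => hmx h.symm
          have herase : (x :: rest.filter (fun v => decide (0 < v))).erase m
              = x :: (rest.filter (fun v => decide (0 < v))).erase m :=
            List.erase_cons_tail (by simpa using hxm)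
          rw [herase]
          simp [mergeP, hx']

lemma b_eq_merge (z : List Int) :
    positiboak_ordenatu_alt z = mergeP z (sortedP (z.filter (fun x => decide (0 < x)))) :=
  selGo_eq z.length z rfl

-- ===== VERDICT (by name: the statement is the Claim_ definition above) =====
theorem positiboak_ordenatu_spec : Claim_equal_positiboak_ordenatu := by
  intro z _
  unfold Spec_positiboak_ordenatu
  rw [a_eq_merge, b_eq_merge]
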